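-- pv_equiv track=rewrite | github.com/anisimovalinaa/Development_of_translators | laba1.py | to_share
-- ===== SOURCE A (Python) =====
-- def find_code(lexeme, dictionary):
--     class_lex = num = str()
--     for key in dictionary.keys():
--         if lexeme in dictionary[key]:
--             class_lex = key
--             num = str(dictionary[key][lexeme])
--     return class_lex + num
--
-- def to_share(string, dictionary):
--     separators = [',', ':', ';', '(', ')', '+', '-', '/', '*', '=', '<', '>', '.', '[', ']']
--     word = str()
--     seq = []
--     if (len(string) > 0 and string[0] == '\'') or string in [':=', '<=', '>=', '<>', 'mod', 'div']:
--         code = find_code(string, dictionary)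
--         seq.append(code)
--     else:
--         for i in range(len(string)):
--             if string[i] not in separators:
--                 word += string[i]
--                 if i + 1 == len(string):
--                     code = find_code(word, dictionary)
--                     seq += [code]
--             else:
--                 code_sep = find_code(string[i], dictionary)
--                 if word != '':
--                     code = find_code(word, dictionary)
--                     seq += [code, code_sep]
--                 else:
--                     seq += [code_sep]
--                 word = ''
--     return seq
-- ===== SOURCE B (Python) =====
-- def to_share(string, dictionary):
--     separators = ',:;()+-/*=<>.[]'
--     table = {lex: key + str(num)
--              for key, sub in dictionary.items()
--              for lex, num in sub.items()}
--     if string[:1] == "'" or string in (':=', '<=', '>=', '<>', 'mod', 'div'):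
--         return [table.get(string, '')]
--
--     def walk(s):
--         if not s:
--             return []
--         if s[0] in separators:
--             return [s[0]] + walk(s[1:])
--         j = 1
--         while j < len(s) and s[j] not in separators:
--             j += 1
--         return [s[:j]] + walk(s[j:])
--
--     return [table.get(tok, '') for tok in walk(string)]
-- ===== Notes on version B (the rewrite author's own statement) =====
-- stated objective: alternative
-- what changed: B precomputes one flat lexeme-to-code table from the nested dictionary (insertion-order overwrite reproduces A's last-match-wins), so A's per-token scan over every dictionary class disappears into a single lookup, and replaces A's char-by-char accumulate-and-flush loop by a recursive-descent tokenizer that consumes whole non-separator runs at a time.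
import Mathlib
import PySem

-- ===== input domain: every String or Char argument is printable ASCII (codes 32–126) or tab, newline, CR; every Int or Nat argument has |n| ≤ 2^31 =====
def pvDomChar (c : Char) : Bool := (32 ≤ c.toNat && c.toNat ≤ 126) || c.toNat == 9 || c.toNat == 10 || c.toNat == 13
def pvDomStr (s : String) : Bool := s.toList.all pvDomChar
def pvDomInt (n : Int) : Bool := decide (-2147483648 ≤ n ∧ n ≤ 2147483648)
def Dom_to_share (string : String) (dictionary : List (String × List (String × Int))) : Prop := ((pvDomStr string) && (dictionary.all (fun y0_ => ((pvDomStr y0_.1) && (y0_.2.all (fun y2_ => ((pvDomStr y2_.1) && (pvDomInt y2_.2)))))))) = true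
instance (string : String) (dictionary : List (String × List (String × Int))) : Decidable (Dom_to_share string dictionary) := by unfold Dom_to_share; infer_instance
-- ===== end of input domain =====

-- B precomputes a flat lexeme→code table (replacing A's per-token scan over every
-- dictionary class by one lookup) and tokenizes by recursive descent over whole
-- non-separator runs instead of A's char-by-char accumulate-and-flush loop;
-- objective: alternative decomposition (no speed claim).

-- ===== PORT A =====
def pvSeps : List Char := [',', ':', ';', '(', ')', '+', '-', '/', '*', '=', '<', '>', '.', '[', ']']

def pvSpecials : List String := [":=", "<=", ">=", "<>", "mod", "div"]

-- find_code: 'for key in dictionary.keys(): if lexeme in dictionary[key]: class_lex = key; num = str(...)'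
-- (last match wins); the Python dict arguments are realised as PySem.Dict.ofList.
def find_code (lexeme : String) (dictionary : List (String × List (String × Int))) : String :=
  let r := (PySem.Dict.ofList dictionary).items.foldl
    (fun (acc : String × String) kv =>
      match (PySem.Dict.ofList kv.2).get? lexeme with
      | some v => (kv.1, PySem.Int.toStr v)
      | none => acc) ("", "")
  r.1 ++ r.2

-- the 'for i in range(len(string))' loop of A: state (word, seq); 'i + 1 == len(string)' is 'rest = []'
def to_share_loop (dictionary : List (String × List (String × Int))) :
    List Char → List Char → List String → List String
  | word, c :: rest, seq =>
    if c ∉ pvSeps then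
      let word' := word ++ [c]
      if rest = [] then seq ++ [find_code (String.mk word') dictionary]
      else to_share_loop dictionary word' rest seq
    else
      let code_sep := find_code (String.mk [c]) dictionary
      let seq' := if word ≠ [] then
          seq ++ [find_code (String.mk word) dictionary, code_sep]
        else seq ++ [code_sep]
      to_share_loop dictionary [] rest seq'
  | _, [], seq => seq

def to_share (string : String) (dictionary : List (String × List (String × Int))) : List String :=
  if (0 < string.toList.length ∧ string.toList.headD ' ' = '\'') ∨ string ∈ pvSpecials then
    [find_code string dictionary]
  else
    to_share_loop dictionary [] string.toList []

-- ===== PORT B =====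
-- B's table comprehension: one pass over the nested dict, inserting lex ↦ key + str(num)
-- (dict-comprehension overwrite = last occurrence wins, as in A's scan)
def pvBuildTable (dictionary : List (String × List (String × Int))) : PySem.Dict String String :=
  (PySem.Dict.ofList dictionary).items.foldl
    (fun t kv => (PySem.Dict.ofList kv.2).items.foldl
      (fun t p => t.insert p.1 (kv.1 ++ PySem.Int.toStr p.2)) t)
    PySem.Dict.empty

-- B's inner 'while j < len(s) and s[j] not in separators' scan: split off the
-- maximal non-separator run (s[:j], s[j:])
def pvSpan : List Char → List Char × List Char
  | [] => ([], [])
  | c :: rest =>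
    if c ∈ pvSeps then ([], c :: rest)
    else
      let r := pvSpan rest
      (c :: r.1, r.2)

theorem pvSpan_snd_length_le : ∀ s : List Char, (pvSpan s).2.length ≤ s.length := by
  intro s
  induction s with
  | nil => simp [pvSpan]
  | cons c rest ih =>
    by_cases h : c ∈ pvSeps
    · simp [pvSpan, h]
    · simp only [pvSpan, if_neg h]
      exact Nat.le_succ_of_le ih

-- B's recursive-descent walk: a separator is its own token, otherwise a whole run
def pvWalk : List Char → List (List Char)
  | [] => []
  | c :: rest =>
    if c ∈ pvSeps then [c] :: pvWalk rest
    else (c :: (pvSpan rest).1) :: pvWalk (pvSpan rest).2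
  termination_by s => s.length
  decreasing_by
  · simp
  · exact Nat.lt_succ_of_le (pvSpan_snd_length_le rest)

def to_share_alt (string : String) (dictionary : List (String × List (String × Int))) : List String :=
  let table := pvBuildTable dictionary
  if string.toList.take 1 = ['\''] ∨ string ∈ pvSpecials then
    [table.getD string ""]
  else
    (pvWalk string.toList).map (fun t => table.getD (String.mk t) "")

-- ===== PRECONDITION & SPEC =====
def Spec_to_share (string : String) (dictionary : List (String × List (String × Int))) (out : List String) : Prop := out = to_share_alt string dictionary
instance (string : String) (dictionary : List (String × List (String × Int))) (out : List String) : Decidable (Spec_to_share string dictionary out) := by unfold Spec_to_share; infer_instance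

-- ===== CLAIM (what is proved, stated in full; the proofs are below) =====
def Claim_equal_to_share : Prop := ∀ (string : String) (dictionary : List (String × List (String × Int))), Dom_to_share string dictionary → Spec_to_share string dictionary (to_share string dictionary)

-- ===== LEMMAS AND PROOFS =====

-- lookup after folding inserts of an assoc list with distinct keys = first (only) match
theorem foldl_insert_getD (x key : String) :
    ∀ (l : List (String × Int)) (t : PySem.Dict String String),
      (l.map Prod.fst).Nodup →
      (l.foldl (fun t p => t.insert p.1 (key ++ PySem.Int.toStr p.2)) t).getD x ""
      = match l.find? (fun p => p.1 == x) with
        | some p => key ++ PySem.Int.toStr p.2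
        | none => t.getD x "" := by
  intro l
  induction l with
  | nil => intro t _; simp
  | cons p rest ih =>
    intro t hnd
    simp only [List.map_cons, List.nodup_cons] at hnd
    rw [List.foldl_cons, ih _ hnd.2]
    by_cases hx : p.1 = x
    · have hrest : rest.find? (fun q => q.1 == x) = none := by
        rw [List.find?_eq_none]
        intro q hq hqx
        have hq1 : q.1 = p.1 := by rw [hx]; simpa using hqx
        have hmem : q.1 ∈ rest.map Prod.fst := List.mem_map_of_mem hq
        exact hnd.1 (by rwa [hq1] at hmem)
      rw [List.find?_cons_of_pos (by simpa using hx), hrest]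
      simp [hx, PySem.Dict.getD_insert_self]
    · rw [List.find?_cons_of_neg (by simpa using hx)]
      cases rest.find? (fun q => q.1 == x) with
      | some q => rfl
      | none => exact PySem.Dict.getD_insert_of_ne _ _ _ (fun (h : x = p.1) => hx h.symm)

-- a Dict's get? is the first match over its items
theorem get?_eq_find?_items (x : String) (d : PySem.Dict String Int) :
    d.get? x = (d.items.find? (fun p => p.1 == x)).map Prod.snd := by
  cases d with
  | mk l =>
    induction l with
    | nil => simp [PySem.Dict.get?]
    | cons p rest ih =>
      cases p with
      | mk k v =>
        rw [show (PySem.Dict.mk ((k, v) :: rest)).items = (k, v) :: rest from rfl]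
        by_cases h : k = x
        · rw [List.find?_cons_of_pos (by simpa using h),
            PySem.Dict.get?_mk_cons, if_pos (by simpa using h)]
          rfl
        · rw [List.find?_cons_of_neg (by simpa using h),
            PySem.Dict.get?_mk_cons, if_neg (by simpa using h), ih]

-- the flat table realises A's last-match-wins scan
theorem table_getD (x : String) (dictionary : List (String × List (String × Int))) :
    (pvBuildTable dictionary).getD x "" = find_code x dictionary := by
  unfold pvBuildTable find_code
  generalize (PySem.Dict.ofList dictionary).items = items
  suffices h : ∀ (items : List (String × List (String × Int))) (t : PySem.Dict String String)
      (acc : String × String), t.getD x "" = acc.1 ++ acc.2 →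
      (items.foldl (fun t kv => (PySem.Dict.ofList kv.2).items.foldl
          (fun t p => t.insert p.1 (kv.1 ++ PySem.Int.toStr p.2)) t) t).getD x ""
      = (items.foldl (fun (acc : String × String) kv =>
          match (PySem.Dict.ofList kv.2).get? x with
          | some v => (kv.1, PySem.Int.toStr v)
          | none => acc) acc).1
        ++ (items.foldl (fun (acc : String × String) kv =>
          match (PySem.Dict.ofList kv.2).get? x with
          | some v => (kv.1, PySem.Int.toStr v)
          | none => acc) acc).2 by
    exact h items PySem.Dict.empty ("", "") (by simp)
  clear items
  intro items
  induction items with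
  | nil => intro t acc h; simpa using h
  | cons kv rest ih =>
    intro t acc h
    simp only [List.foldl_cons]
    apply ih
    have hnd : ((PySem.Dict.ofList kv.2).items.map Prod.fst).Nodup :=
      PySem.Dict.nodup_keys_ofList kv.2
    rw [foldl_insert_getD x kv.1 _ t hnd, get?_eq_find?_items]
    cases (PySem.Dict.ofList kv.2).items.find? (fun p => p.1 == x) with
    | some p => simp
    | none => simpa using h

-- A's loop with pending word, expressed as the token list it will emit
def pvTokensFrom : List Char → List Char → List (List Char)
  | _, [] => []
  | word, c :: rest =>
    if c ∈ pvSeps then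
      (if word ≠ [] then [word, [c]] else [[c]]) ++ pvTokensFrom [] rest
    else if rest = [] then [word ++ [c]]
    else pvTokensFrom (word ++ [c]) rest

theorem loop_eq_map (dictionary : List (String × List (String × Int))) :
    ∀ (s : List Char) (word : List Char) (seq : List String),
      to_share_loop dictionary word s seq
      = seq ++ (pvTokensFrom word s).map (fun t => find_code (String.mk t) dictionary) := by
  intro s
  induction s with
  | nil => intro word seq; simp [to_share_loop, pvTokensFrom]
  | cons c rest ih =>
    intro word seq
    by_cases hc : c ∈ pvSeps
    · rw [to_share_loop, if_neg (by simpa using hc), pvTokensFrom, if_pos hc, ih]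
      by_cases hw : word = [] <;> simp [hw, List.append_assoc]
    · rw [to_share_loop, if_pos hc, pvTokensFrom, if_neg hc]
      cases rest with
      | nil => simp
      | cons d rest' => rw [if_neg (by simp), if_neg (by simp), ih]

-- continuing a pending non-separator run = prepend it to the span token
theorem tokensFrom_nonsep :
    ∀ (s : List Char) (c : Char), c ∉ pvSeps → ∀ (word : List Char),
      pvTokensFrom word (c :: s)
      = (word ++ c :: (pvSpan s).1) :: pvTokensFrom [] (pvSpan s).2 := by
  intro s
  induction s with
  | nil => intro c hc word; simp [pvTokensFrom, pvSpan, hc]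
  | cons d rest ih =>
    intro c hc word
    rw [pvTokensFrom, if_neg hc, if_neg (by simp)]
    by_cases hd : d ∈ pvSeps
    · rw [pvTokensFrom, if_pos hd]
      simp only [pvSpan, if_pos hd]
      rw [pvTokensFrom, if_pos hd]
      simp
    · rw [ih d hd (word ++ [c])]
      simp [pvSpan, hd]

theorem tokensFrom_nil_eq_walk : ∀ (n : Nat) (s : List Char), s.length ≤ n →
    pvTokensFrom [] s = pvWalk s := by
  intro n
  induction n with
  | zero =>
    intro s hs
    rw [List.length_eq_zero_iff.mp (Nat.le_zero.mp hs)]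
    simp [pvTokensFrom, pvWalk]
  | succ n ih =>
    intro s hs
    cases s with
    | nil => simp [pvTokensFrom, pvWalk]
    | cons c rest =>
      simp only [List.length_cons, Nat.succ_le_succ_iff] at hs
      by_cases hc : c ∈ pvSeps
      · rw [pvTokensFrom, if_pos hc, pvWalk, if_pos hc, ih rest hs]
        simp
      · rw [tokensFrom_nonsep rest c hc, pvWalk, if_neg hc,
          ih _ (Nat.le_trans (pvSpan_snd_length_le rest) hs)]
        simp

-- A's guard and B's 'string[:1] == "\'"' guard coincide
theorem guard_iff (l : List Char) :
    ((0 < l.length ∧ l.headD ' ' = '\'')) ↔ l.take 1 = ['\''] := by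
  cases l with
  | nil => simp
  | cons c rest => simp

-- ===== VERDICT (by name: the statement is the Claim_ definition above) =====
theorem to_share_spec : Claim_equal_to_share := by
  intro string dictionary _
  show to_share string dictionary = to_share_alt string dictionary
  simp only [to_share, to_share_alt]
  by_cases hg : (0 < string.toList.length ∧ string.toList.headD ' ' = '\'') ∨ string ∈ pvSpecials
  · rw [if_pos hg, if_pos (hg.imp (guard_iff _).mp id), table_getD]
  · rw [if_neg hg, if_neg (fun h => hg (h.imp (guard_iff _).mpr id)),
      loop_eq_map, ← tokensFrom_nil_eq_walk string.toList.length _ le_rfl]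
    simp [table_getD]
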